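-- pv_equiv track=rewrite | github.com/rorySomething/python-shorties | menace.py | getBoardSet
-- ===== SOURCE A (Python) =====
-- def boardToInt(board):
--     """board is array of X or O"""
--     n = 0
--     for p in board[::-1]: # Loop backwards
--         if p == '':
--             n <<= 2 # 2   0's
--             continue
--         n |= 1
--         n <<= 1
--         if p == 'X':
--             n |= 1
--         n <<= 1
--     n >>= 1
--     return n
--
-- def intToBoard(n):
--     board = []
--     for i in range(9):
--         val = n & 3
--         n >>= 2
--         if val == 3:
--             board.append('X')
--         elif val == 2:
--             board.append('O')
--         else:
--             board.append('')
--     return board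
--
-- def rotate(boardNumber):
--     b = intToBoard(boardNumber)
--     # 012   630
--     # 345 = 741
--     # 678   852
--     b[0], b[1], b[2], b[5], b[8], b[7], b[6], b[3] = b[6], b[3], b[0], b[1], b[2], b[5], b[8], b[7]
--     return boardToInt(b)
--
-- def mirror0(boardNumber):
--     """Horizontal"""
--     b = intToBoard(boardNumber)
--     # 012   678
--     # 345 = 345
--     # 678   012
--     b[0], b[1], b[2], b[6], b[7], b[8] = b[6], b[7], b[8], b[0], b[1], b[2]
--     return boardToInt(b)
--
-- def mirror1(boardNumber):
--     """Vertical"""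
--     b = intToBoard(boardNumber)
--     # 012   210
--     # 345 = 543
--     # 678   876
--     b[0], b[2], b[3], b[5], b[6], b[8] = b[2], b[0], b[5], b[3], b[8], b[6]
--     return boardToInt(b)
--
-- def mirror2(boardNumber):
--     """Diagonal /"""
--     b = intToBoard(boardNumber)
--     # 012   852
--     # 345 = 741
--     # 678   630
--     b[0], b[1], b[3], b[5], b[7], b[8] = b[8], b[5], b[7], b[1], b[3], b[0]
--     return boardToInt(b)
--
-- def mirror3(boardNumber):
--     """Diagonal \\"""
--     b = intToBoard(boardNumber)
--     # 012   036
--     # 345 = 147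
--     # 678   258
--     b[1], b[2], b[3], b[5], b[6], b[7] = b[3], b[6], b[1], b[7], b[2], b[5]
--     return boardToInt(b)
--
-- def getBoardSet(boardNumber):
--     s = set()
--     a = boardNumber
--     b = mirror0(a)
--     c = mirror1(a)
--     d = mirror2(a)
--     e = mirror3(a)
--     s |= set([a,b,c,d,e])
--     for i in range(3):
--         a = rotate(a)
--         b = rotate(b)
--         c = rotate(c)
--         d = rotate(d)
--         e = rotate(e)
--         s |= set([a,b,c,d,e])
--     return min(s), s
-- ===== SOURCE B (Python) =====
-- # Table-driven re-implementation: decode the board once, apply the 7 precomputed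
-- # non-identity D4 symmetry index permutations, encode each, collect in a set.
--
-- def boardToInt(board):
--     """board is array of X or O"""
--     n = 0
--     for p in board[::-1]:  # Loop backwards
--         if p == '':
--             n <<= 2
--             continue
--         n |= 1
--         n <<= 1
--         if p == 'X':
--             n |= 1
--         n <<= 1
--     n >>= 1
--     return n
--
-- def intToBoard(n):
--     board = []
--     for i in range(9):
--         val = n & 3
--         n >>= 2
--         if val == 3:
--             board.append('X')
--         elif val == 2:
--             board.append('O')
--         else:
--             board.append('')
--     return board
--
-- # mirror0, mirror1, mirror2, mirror3, rotate, rotate^2, rotate^3 as index tables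
-- SYMS = [
--     (6, 7, 8, 3, 4, 5, 0, 1, 2),
--     (2, 1, 0, 5, 4, 3, 8, 7, 6),
--     (8, 5, 2, 7, 4, 1, 6, 3, 0),
--     (0, 3, 6, 1, 4, 7, 2, 5, 8),
--     (6, 3, 0, 7, 4, 1, 8, 5, 2),
--     (8, 7, 6, 5, 4, 3, 2, 1, 0),
--     (2, 5, 8, 1, 4, 7, 0, 3, 6),
-- ]
--
-- def getBoardSet(boardNumber):
--     board = intToBoard(boardNumber)
--     s = {boardNumber}
--     for perm in SYMS:
--         s.add(boardToInt([board[i] for i in perm]))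
--     return min(s), s
-- ===== Notes on version B (the rewrite author's own statement) =====
-- stated objective: alternative
-- what changed: Instead of materialising five mirrored boards and rotating each of them repeatedly (twenty decode+encode round trips through the integer encoding), B decodes the board once and applies seven precomputed D4 index permutations, encoding each permuted board directly.
import Mathlib
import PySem

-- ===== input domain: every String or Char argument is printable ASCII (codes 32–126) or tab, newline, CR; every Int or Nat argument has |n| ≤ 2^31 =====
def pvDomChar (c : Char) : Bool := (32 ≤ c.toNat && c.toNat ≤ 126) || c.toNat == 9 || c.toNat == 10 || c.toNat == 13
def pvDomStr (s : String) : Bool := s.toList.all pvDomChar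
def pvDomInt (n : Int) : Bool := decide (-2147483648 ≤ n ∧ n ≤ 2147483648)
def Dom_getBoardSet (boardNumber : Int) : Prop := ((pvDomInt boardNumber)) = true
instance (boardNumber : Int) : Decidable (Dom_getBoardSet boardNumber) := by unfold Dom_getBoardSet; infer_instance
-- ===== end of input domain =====

-- B replaces A's twenty decode/encode round trips (five mirrored boards, each rotated three
-- times) by one decode and seven precomputed D4 index-permutation passes over the cells.

-- ===== PORT A =====

-- loop body of boardToInt (the 'continue' branch is the if's then-branch)
def btiStep (n : Int) (p : String) : Int :=
  if p == "" then n <<< (2 : Nat)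
  else
    let n1 := PySem.Int.bor n 1
    let n2 := n1 <<< (1 : Nat)
    let n3 := if p == "X" then PySem.Int.bor n2 1 else n2
    n3 <<< (1 : Nat)

def boardToInt (board : List String) : Int :=
  -- board[::-1]: slice with step -1 never raises (step ≠ 0), so getD is never the default
  ((((PySem.List.slice? board none none (-1)).getD []).foldl btiStep 0) >>> (1 : Nat))

-- loop body of intToBoard: state (n, board)
def itbStep (st : Int × List String) (_i : Int) : Int × List String :=
  let val := PySem.Int.band st.1 3
  let n := st.1 >>> (2 : Nat)
  (n, if val == 3 then st.2 ++ ["X"] else if val == 2 then st.2 ++ ["O"] else st.2 ++ [""])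

def intToBoard (n : Int) : List String :=
  ((PySem.List.pyRange 0 9 1).foldl itbStep (n, [])).2

-- b[i]; every access below is in range (intToBoard always returns 9 cells)
def pyg (b : List String) (i : Int) : String := (PySem.List.pyGet? b i).getD ""

-- the parallel assignments build the permuted board; position 4 is untouched
def rotate (n : Int) : Int :=
  let b := intToBoard n
  boardToInt [pyg b 6, pyg b 3, pyg b 0, pyg b 7, pyg b 4, pyg b 1, pyg b 8, pyg b 5, pyg b 2]

def mirror0 (n : Int) : Int :=
  let b := intToBoard n
  boardToInt [pyg b 6, pyg b 7, pyg b 8, pyg b 3, pyg b 4, pyg b 5, pyg b 0, pyg b 1, pyg b 2]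

def mirror1 (n : Int) : Int :=
  let b := intToBoard n
  boardToInt [pyg b 2, pyg b 1, pyg b 0, pyg b 5, pyg b 4, pyg b 3, pyg b 8, pyg b 7, pyg b 6]

def mirror2 (n : Int) : Int :=
  let b := intToBoard n
  boardToInt [pyg b 8, pyg b 5, pyg b 2, pyg b 7, pyg b 4, pyg b 1, pyg b 6, pyg b 3, pyg b 0]

def mirror3 (n : Int) : Int :=
  let b := intToBoard n
  boardToInt [pyg b 0, pyg b 3, pyg b 6, pyg b 1, pyg b 4, pyg b 7, pyg b 2, pyg b 5, pyg b 8]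

def getBoardSet (boardNumber : Int) : Int × List Int :=
  let s : PySem.Set Int := PySem.Set.empty
  let a := boardNumber
  let b := mirror0 a
  let c := mirror1 a
  let d := mirror2 a
  let e := mirror3 a
  let s := PySem.Set.union s (PySem.Set.ofList [a, b, c, d, e])
  let st := (PySem.List.pyRange 0 3 1).foldl
    (fun (st : Int × Int × Int × Int × Int × PySem.Set Int) _ =>
      let a := rotate st.1
      let b := rotate st.2.1
      let c := rotate st.2.2.1
      let d := rotate st.2.2.2.1
      let e := rotate st.2.2.2.2.1
      (a, b, c, d, e, PySem.Set.union st.2.2.2.2.2 (PySem.Set.ofList [a, b, c, d, e])))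
    (a, b, c, d, e, s)
  let s := st.2.2.2.2.2
  -- min(s): s always contains boardNumber, so min never sees an empty set
  ((PySem.List.min? s (fun x => x)).getD 0, s)

-- ===== PORT B =====

def symPerms : List (List Int) :=
  [[6, 7, 8, 3, 4, 5, 0, 1, 2],
   [2, 1, 0, 5, 4, 3, 8, 7, 6],
   [8, 5, 2, 7, 4, 1, 6, 3, 0],
   [0, 3, 6, 1, 4, 7, 2, 5, 8],
   [6, 3, 0, 7, 4, 1, 8, 5, 2],
   [8, 7, 6, 5, 4, 3, 2, 1, 0],
   [2, 5, 8, 1, 4, 7, 0, 3, 6]]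

def getBoardSet_alt (boardNumber : Int) : Int × List Int :=
  let board := intToBoard boardNumber
  let s := symPerms.foldl
    (fun (s : PySem.Set Int) perm =>
      PySem.Set.add s (boardToInt (perm.map (fun i => pyg board i))))
    (PySem.Set.ofList [boardNumber])
  ((PySem.List.min? s (fun x => x)).getD 0, s)

-- ===== PRECONDITION & SPEC =====
def Spec_getBoardSet (boardNumber : Int) (out : Int × List Int) : Prop := out = getBoardSet_alt boardNumber
instance (boardNumber : Int) (out : Int × List Int) : Decidable (Spec_getBoardSet boardNumber out) := by unfold Spec_getBoardSet; infer_instance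

-- ===== CLAIM (what is proved, stated in full; the proofs are below) =====
def Claim_equal_getBoardSet : Prop := ∀ (boardNumber : Int), Dom_getBoardSet boardNumber → Spec_getBoardSet boardNumber (getBoardSet boardNumber)

-- ===== LEMMAS AND PROOFS =====

-- decoded cell of a two-bit value
def cellD (v : Int) : String :=
  if PySem.Int.band v 3 == 3 then "X" else if PySem.Int.band v 3 == 2 then "O" else ""

def IsCell (s : String) : Prop := s = "" ∨ s = "X" ∨ s = "O"

-- encoding of one cell (two-bit code)
def code (s : String) : Int := if s = "" then 0 else if s = "X" then 3 else 2

theorem itbStep_eq (st : Int × List String) (i : Int) :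
    itbStep st i = (st.1 >>> (2 : Nat), st.2 ++ [cellD st.1]) := by
  unfold itbStep cellD
  rcases h3 : (PySem.Int.band st.1 3 == 3) <;> rcases h2 : (PySem.Int.band st.1 3 == 2) <;>
    simp [h3, h2]

theorem pyRange09 : PySem.List.pyRange 0 9 1 = [0, 1, 2, 3, 4, 5, 6, 7, 8] := by decide

theorem pyRange03 : PySem.List.pyRange 0 3 1 = [0, 1, 2] := by decide

theorem intToBoard_eq (n : Int) :
    intToBoard n =
      [cellD n, cellD (n >>> (2:Nat)), cellD (n >>> (2:Nat) >>> (2:Nat)),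
       cellD (n >>> (2:Nat) >>> (2:Nat) >>> (2:Nat)),
       cellD (n >>> (2:Nat) >>> (2:Nat) >>> (2:Nat) >>> (2:Nat)),
       cellD (n >>> (2:Nat) >>> (2:Nat) >>> (2:Nat) >>> (2:Nat) >>> (2:Nat)),
       cellD (n >>> (2:Nat) >>> (2:Nat) >>> (2:Nat) >>> (2:Nat) >>> (2:Nat) >>> (2:Nat)),
       cellD (n >>> (2:Nat) >>> (2:Nat) >>> (2:Nat) >>> (2:Nat) >>> (2:Nat) >>> (2:Nat) >>> (2:Nat)),
       cellD (n >>> (2:Nat) >>> (2:Nat) >>> (2:Nat) >>> (2:Nat) >>> (2:Nat) >>> (2:Nat) >>> (2:Nat) >>> (2:Nat))] := by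
  unfold intToBoard
  rw [pyRange09]
  simp only [List.foldl_cons, List.foldl_nil, itbStep_eq]
  simp

theorem isCell_cellD (v : Int) : IsCell (cellD v) := by
  unfold cellD IsCell
  split
  · exact Or.inr (Or.inl rfl)
  split
  · exact Or.inr (Or.inr rfl)
  · exact Or.inl rfl

theorem code_range (s : String) : 0 ≤ code s ∧ code s ≤ 3 := by
  unfold code; split_ifs <;> norm_num

theorem shiftL1 (n : Int) : n <<< (1 : Nat) = 2 * n := by
  rw [Int.shiftLeft_eq]; ring

theorem shiftL2 (n : Int) : n <<< (2 : Nat) = 4 * n := by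
  rw [Int.shiftLeft_eq]; norm_num; ring

theorem shiftR2 (n : Int) : n >>> (2 : Nat) = n / 4 := by
  have h := Int.shiftRight_eq_div_pow n 2
  norm_num at h; exact h

theorem shiftR1 (n : Int) : n >>> (1 : Nat) = n / 2 := by
  have h := Int.shiftRight_eq_div_pow n 1
  norm_num at h; exact h

theorem bor_one_even (n : Int) (h0 : 0 ≤ n) (h2 : n % 2 = 0) : PySem.Int.bor n 1 = n + 1 := by
  rw [PySem.Int.bor_of_nonneg h0 (by norm_num)]
  have hk : n.toNat = (n.toNat / 2) <<< 1 := by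
    rw [Nat.shiftLeft_eq]; omega
  have h := Nat.shiftLeft_add_eq_or_of_lt (a := n.toNat / 2) (b := 1) (i := 1) (by norm_num)
  simp only [Int.toNat_one]
  rw [hk, ← h, Nat.shiftLeft_eq]
  norm_num; omega

theorem btiStep_eq (n : Int) (p : String) (hc : IsCell p) (h0 : 0 ≤ n) (h2 : n % 2 = 0) :
    btiStep n p = 4 * n + 2 * code p := by
  have e1 := bor_one_even n h0 h2
  have e2 := bor_one_even (2 * (n + 1)) (by omega) (by omega)
  rcases hc with h | h | h <;> subst h
  · simp only [btiStep, code, show (("" : String) == "") = true from rfl, if_true, shiftL2]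
    ring
  · simp only [btiStep, code, show (("X" : String) == "") = false from rfl,
      show (("X" : String) == "X") = true from rfl, show ((false = true) = False) from by simp,
      show (("X" : String) = "") = False from by simp, if_true, if_false, e1, e2, shiftL1]
    ring
  · simp only [btiStep, code, show (("O" : String) == "") = false from rfl,
      show (("O" : String) == "X") = false from rfl, show ((false = true) = False) from by simp,
      show (("O" : String) = "") = False from by simp,
      show (("O" : String) = "X") = False from by simp, if_false, e1, shiftL1]
    ring

theorem band3 (v : Int) (h : 0 ≤ v) : PySem.Int.band v 3 = v % 4 := by
  rw [PySem.Int.band_of_nonneg h (by norm_num)]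
  have : (3 : Int).toNat = 3 := rfl
  rw [this, Nat.and_two_pow_sub_one_eq_mod v.toNat 2]
  omega

theorem cellD_eq (v : Int) (h0 : 0 ≤ v) (c : String) (hc : IsCell c) (hm : v % 4 = code c) :
    cellD v = c := by
  unfold cellD
  rw [band3 v h0, hm]
  rcases hc with h | h | h <;> subst h <;> simp [code]

theorem boardToInt_eq (c0 c1 c2 c3 c4 c5 c6 c7 c8 : String)
    (h0 : IsCell c0) (h1 : IsCell c1) (h2 : IsCell c2) (h3 : IsCell c3) (h4 : IsCell c4)
    (h5 : IsCell c5) (h6 : IsCell c6) (h7 : IsCell c7) (h8 : IsCell c8) :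
    boardToInt [c0, c1, c2, c3, c4, c5, c6, c7, c8] =
      code c0 + 4 * code c1 + 16 * code c2 + 64 * code c3 + 256 * code c4 +
        1024 * code c5 + 4096 * code c6 + 16384 * code c7 + 65536 * code c8 := by
  obtain ⟨l0, u0⟩ := code_range c0
  obtain ⟨l1, u1⟩ := code_range c1
  obtain ⟨l2, u2⟩ := code_range c2
  obtain ⟨l3, u3⟩ := code_range c3
  obtain ⟨l4, u4⟩ := code_range c4
  obtain ⟨l5, u5⟩ := code_range c5
  obtain ⟨l6, u6⟩ := code_range c6
  obtain ⟨l7, u7⟩ := code_range c7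
  obtain ⟨l8, u8⟩ := code_range c8
  unfold boardToInt
  rw [PySem.List.slice?_none_none_neg_one]
  simp only [Option.getD_some]
  rw [show List.reverse [c0, c1, c2, c3, c4, c5, c6, c7, c8] =
        [c8, c7, c6, c5, c4, c3, c2, c1, c0] from by simp]
  simp only [List.foldl_cons, List.foldl_nil]
  rw [btiStep_eq _ _ h8 (by norm_num) (by norm_num)]
  rw [btiStep_eq _ _ h7 (by omega) (by omega)]
  rw [btiStep_eq _ _ h6 (by omega) (by omega)]
  rw [btiStep_eq _ _ h5 (by omega) (by omega)]
  rw [btiStep_eq _ _ h4 (by omega) (by omega)]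
  rw [btiStep_eq _ _ h3 (by omega) (by omega)]
  rw [btiStep_eq _ _ h2 (by omega) (by omega)]
  rw [btiStep_eq _ _ h1 (by omega) (by omega)]
  rw [btiStep_eq _ _ h0 (by omega) (by omega)]
  rw [shiftR1]
  omega

theorem roundtrip (c0 c1 c2 c3 c4 c5 c6 c7 c8 : String)
    (h0 : IsCell c0) (h1 : IsCell c1) (h2 : IsCell c2) (h3 : IsCell c3) (h4 : IsCell c4)
    (h5 : IsCell c5) (h6 : IsCell c6) (h7 : IsCell c7) (h8 : IsCell c8) :
    intToBoard (boardToInt [c0, c1, c2, c3, c4, c5, c6, c7, c8]) =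
      [c0, c1, c2, c3, c4, c5, c6, c7, c8] := by
  obtain ⟨l0, u0⟩ := code_range c0
  obtain ⟨l1, u1⟩ := code_range c1
  obtain ⟨l2, u2⟩ := code_range c2
  obtain ⟨l3, u3⟩ := code_range c3
  obtain ⟨l4, u4⟩ := code_range c4
  obtain ⟨l5, u5⟩ := code_range c5
  obtain ⟨l6, u6⟩ := code_range c6
  obtain ⟨l7, u7⟩ := code_range c7
  obtain ⟨l8, u8⟩ := code_range c8
  rw [boardToInt_eq _ _ _ _ _ _ _ _ _ h0 h1 h2 h3 h4 h5 h6 h7 h8, intToBoard_eq]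
  simp only [shiftR2]
  refine List.ext_getElem (by simp) ?_
  intro i hidx hidx2
  simp only [List.length_cons, List.length_nil] at hidx
  interval_cases i <;> simp only [List.getElem_cons_zero, List.getElem_cons_succ]
  · exact cellD_eq _ (by omega) _ h0 (by omega)
  · exact cellD_eq _ (by omega) _ h1 (by omega)
  · exact cellD_eq _ (by omega) _ h2 (by omega)
  · exact cellD_eq _ (by omega) _ h3 (by omega)
  · exact cellD_eq _ (by omega) _ h4 (by omega)
  · exact cellD_eq _ (by omega) _ h5 (by omega)
  · exact cellD_eq _ (by omega) _ h6 (by omega)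
  · exact cellD_eq _ (by omega) _ h7 (by omega)
  · exact cellD_eq _ (by omega) _ h8 (by omega)

-- pyg on a literal 9-list
theorem pyg0 (a b c d e f g h i : String) : pyg [a,b,c,d,e,f,g,h,i] 0 = a := rfl
theorem pyg1 (a b c d e f g h i : String) : pyg [a,b,c,d,e,f,g,h,i] 1 = b := rfl
theorem pyg2 (a b c d e f g h i : String) : pyg [a,b,c,d,e,f,g,h,i] 2 = c := rfl
theorem pyg3 (a b c d e f g h i : String) : pyg [a,b,c,d,e,f,g,h,i] 3 = d := rfl
theorem pyg4 (a b c d e f g h i : String) : pyg [a,b,c,d,e,f,g,h,i] 4 = e := rfl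
theorem pyg5 (a b c d e f g h i : String) : pyg [a,b,c,d,e,f,g,h,i] 5 = f := rfl
theorem pyg6 (a b c d e f g h i : String) : pyg [a,b,c,d,e,f,g,h,i] 6 = g := rfl
theorem pyg7 (a b c d e f g h i : String) : pyg [a,b,c,d,e,f,g,h,i] 7 = h := rfl
theorem pyg8 (a b c d e f g h i : String) : pyg [a,b,c,d,e,f,g,h,i] 8 = i := rfl

theorem rotate_bti (y0 y1 y2 y3 y4 y5 y6 y7 y8 : String)
    (h0 : IsCell y0) (h1 : IsCell y1) (h2 : IsCell y2) (h3 : IsCell y3) (h4 : IsCell y4)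
    (h5 : IsCell y5) (h6 : IsCell y6) (h7 : IsCell y7) (h8 : IsCell y8) :
    rotate (boardToInt [y0, y1, y2, y3, y4, y5, y6, y7, y8]) =
      boardToInt [y6, y3, y0, y7, y4, y1, y8, y5, y2] := by
  unfold rotate
  rw [roundtrip _ _ _ _ _ _ _ _ _ h0 h1 h2 h3 h4 h5 h6 h7 h8]
  simp only [pyg0, pyg1, pyg2, pyg3, pyg4, pyg5, pyg6, pyg7, pyg8]

-- set(xs) consumed by update ≡ the raw list consumed by update
theorem update_ofList {α : Type} [BEq α] [LawfulBEq α] (s : PySem.Set α) (l : List α) :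
    PySem.Set.update s (PySem.Set.ofList l) = PySem.Set.update s l := by
  induction l using List.reverseRecOn generalizing s with
  | nil => rfl
  | append_singleton xs x ih =>
    rw [PySem.Set.ofList_append_singleton]
    by_cases hx : x ∈ PySem.Set.ofList xs
    · rw [PySem.Set.add_of_mem hx, ih, PySem.Set.update_append,
        PySem.Set.update_cons, PySem.Set.update_nil,
        PySem.Set.add_of_mem (by
          rw [PySem.Set.mem_update]
          exact Or.inr ((PySem.Set.mem_ofList _ _).mp hx))]
    · rw [PySem.Set.add_of_not_mem hx, PySem.Set.update_append, PySem.Set.update_append, ih]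

-- the combinatorial heart: A's four unions collapse to B's eight adds
theorem setkey (v w0 w1 w2 w3 r1 r2 r3 : Int) :
    PySem.Set.union
      (PySem.Set.union
        (PySem.Set.union
          (PySem.Set.union (PySem.Set.empty) (PySem.Set.ofList [v, w0, w1, w2, w3]))
          (PySem.Set.ofList [r1, w3, w2, w0, w1]))
        (PySem.Set.ofList [r2, w1, w0, w3, w2]))
      (PySem.Set.ofList [r3, w2, w3, w1, w0]) =
    PySem.Set.add (PySem.Set.add (PySem.Set.add (PySem.Set.add (PySem.Set.add
      (PySem.Set.add (PySem.Set.add (PySem.Set.ofList [v]) w0) w1) w2) w3) r1) r2) r3 := by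
  show PySem.Set.update (PySem.Set.update (PySem.Set.update (PySem.Set.update _ _) _) _) _ = _
  rw [update_ofList, update_ofList, update_ofList, update_ofList]
  simp only [PySem.Set.update_cons, PySem.Set.update_nil]
  rw [show PySem.Set.ofList [v] = PySem.Set.add PySem.Set.empty v from rfl]
  simp [PySem.Set.add_of_mem, PySem.Set.mem_add]

-- ===== VERDICT (by name: the statement is the Claim_ definition above) =====
theorem getBoardSet_spec : Claim_equal_getBoardSet := by
  intro n _
  unfold Spec_getBoardSet
  obtain ⟨x0, x1, x2, x3, x4, x5, x6, x7, x8, hb, i0, i1, i2, i3, i4, i5, i6, i7, i8⟩ :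
      ∃ x0 x1 x2 x3 x4 x5 x6 x7 x8,
        intToBoard n = [x0, x1, x2, x3, x4, x5, x6, x7, x8] ∧ IsCell x0 ∧ IsCell x1 ∧
          IsCell x2 ∧ IsCell x3 ∧ IsCell x4 ∧ IsCell x5 ∧ IsCell x6 ∧ IsCell x7 ∧ IsCell x8 :=
    ⟨_, _, _, _, _, _, _, _, _, intToBoard_eq n, isCell_cellD _, isCell_cellD _, isCell_cellD _,
      isCell_cellD _, isCell_cellD _, isCell_cellD _, isCell_cellD _, isCell_cellD _, isCell_cellD _⟩
  have hm0 : mirror0 n = boardToInt [x6, x7, x8, x3, x4, x5, x0, x1, x2] := by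
    unfold mirror0; rw [hb]
    simp only [pyg0, pyg1, pyg2, pyg3, pyg4, pyg5, pyg6, pyg7, pyg8]
  have hm1 : mirror1 n = boardToInt [x2, x1, x0, x5, x4, x3, x8, x7, x6] := by
    unfold mirror1; rw [hb]
    simp only [pyg0, pyg1, pyg2, pyg3, pyg4, pyg5, pyg6, pyg7, pyg8]
  have hm2 : mirror2 n = boardToInt [x8, x5, x2, x7, x4, x1, x6, x3, x0] := by
    unfold mirror2; rw [hb]
    simp only [pyg0, pyg1, pyg2, pyg3, pyg4, pyg5, pyg6, pyg7, pyg8]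
  have hm3 : mirror3 n = boardToInt [x0, x3, x6, x1, x4, x7, x2, x5, x8] := by
    unfold mirror3; rw [hb]
    simp only [pyg0, pyg1, pyg2, pyg3, pyg4, pyg5, pyg6, pyg7, pyg8]
  have hrn : rotate n = boardToInt [x6, x3, x0, x7, x4, x1, x8, x5, x2] := by
    unfold rotate; rw [hb]
    simp only [pyg0, pyg1, pyg2, pyg3, pyg4, pyg5, pyg6, pyg7, pyg8]
  have hR0 : rotate (boardToInt [x6, x7, x8, x3, x4, x5, x0, x1, x2]) =
      boardToInt [x0, x3, x6, x1, x4, x7, x2, x5, x8] :=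
    rotate_bti _ _ _ _ _ _ _ _ _ i6 i7 i8 i3 i4 i5 i0 i1 i2
  have hR1 : rotate (boardToInt [x2, x1, x0, x5, x4, x3, x8, x7, x6]) =
      boardToInt [x8, x5, x2, x7, x4, x1, x6, x3, x0] :=
    rotate_bti _ _ _ _ _ _ _ _ _ i2 i1 i0 i5 i4 i3 i8 i7 i6
  have hR2 : rotate (boardToInt [x8, x5, x2, x7, x4, x1, x6, x3, x0]) =
      boardToInt [x6, x7, x8, x3, x4, x5, x0, x1, x2] :=
    rotate_bti _ _ _ _ _ _ _ _ _ i8 i5 i2 i7 i4 i1 i6 i3 i0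
  have hR3 : rotate (boardToInt [x0, x3, x6, x1, x4, x7, x2, x5, x8]) =
      boardToInt [x2, x1, x0, x5, x4, x3, x8, x7, x6] :=
    rotate_bti _ _ _ _ _ _ _ _ _ i0 i3 i6 i1 i4 i7 i2 i5 i8
  have hRr : rotate (boardToInt [x6, x3, x0, x7, x4, x1, x8, x5, x2]) =
      boardToInt [x8, x7, x6, x5, x4, x3, x2, x1, x0] :=
    rotate_bti _ _ _ _ _ _ _ _ _ i6 i3 i0 i7 i4 i1 i8 i5 i2
  have hRr2 : rotate (boardToInt [x8, x7, x6, x5, x4, x3, x2, x1, x0]) =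
      boardToInt [x2, x5, x8, x1, x4, x7, x0, x3, x6] :=
    rotate_bti _ _ _ _ _ _ _ _ _ i8 i7 i6 i5 i4 i3 i2 i1 i0
  unfold getBoardSet getBoardSet_alt symPerms
  rw [pyRange03]
  simp only [List.foldl_cons, List.foldl_nil, List.map_cons, List.map_nil]
  rw [hb]
  simp only [pyg0, pyg1, pyg2, pyg3, pyg4, pyg5, pyg6, pyg7, pyg8]
  simp only [hm0, hm1, hm2, hm3, hrn, hR0, hR1, hR2, hR3, hRr, hRr2]
  rw [setkey]
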